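-- pv_equiv track=rewrite | github.com/viktorhollanders/python | final exam/yatzy.py | check_two
-- ===== SOURCE A (Python) =====
-- def check_two(numbers):
--     """
--     checks if the user has two of a kind and returns the higher pair if there is more than one pair
--     """
--     result = 0
--     for index, number in enumerate(numbers):
--         if number >= 2:
--             current_number = 2 * (index + 1)
--             if current_number > result:
--                 result = current_number
--             else:
--                 continue
--
--     return result
-- ===== SOURCE B (Python) =====
-- def check_two(numbers):
--     """
--     checks if the user has two of a kind and returns the higher pair if there is more than one pair
--     """
--     for index, number in reversed(list(enumerate(numbers))):
--         if number >= 2: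
--             return 2 * (index + 1)
--     return 0
-- ===== Notes on version B (the rewrite author's own statement) =====
-- stated objective: simpler
-- what changed: B scans the enumerated counts from the end and returns 2*(index+1) at the first count >= 2 (the highest pair), instead of A's forward pass maintaining a running maximum.
import Mathlib
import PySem

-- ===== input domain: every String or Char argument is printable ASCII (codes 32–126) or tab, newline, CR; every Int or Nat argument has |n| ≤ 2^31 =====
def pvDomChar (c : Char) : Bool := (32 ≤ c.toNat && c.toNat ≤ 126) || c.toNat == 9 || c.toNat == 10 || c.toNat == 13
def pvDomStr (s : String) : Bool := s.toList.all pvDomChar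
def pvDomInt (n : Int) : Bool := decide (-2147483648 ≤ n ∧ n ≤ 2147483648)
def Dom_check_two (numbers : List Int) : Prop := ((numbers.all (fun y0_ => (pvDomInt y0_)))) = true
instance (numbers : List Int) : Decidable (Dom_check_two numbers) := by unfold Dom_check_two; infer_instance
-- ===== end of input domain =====

-- B replaces A's forward max-tracking scan by a reverse scan that returns at the first count >= 2 (objective: simpler); same O(n) cost.
-- ===== PORT A =====
def check_two (numbers : List Int) : Int :=
  (PySem.List.enumerate numbers).foldl
    (fun result p =>
      if p.2 ≥ 2 then
        if 2 * (p.1 + 1) > result then 2 * (p.1 + 1) else result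
      else result) 0

-- ===== PORT B =====
-- first pair (index, number) from the END with number >= 2 wins
def altGo : List (Int × Int) → Int
  | [] => 0
  | (i, n) :: rest => if n ≥ 2 then 2 * (i + 1) else altGo rest

def check_two_alt (numbers : List Int) : Int :=
  altGo (PySem.List.enumerate numbers).reverse

-- ===== PRECONDITION & SPEC =====
def Spec_check_two (numbers : List Int) (out : Int) : Prop := out = check_two_alt numbers
instance (numbers : List Int) (out : Int) : Decidable (Spec_check_two numbers out) := by unfold Spec_check_two; infer_instance

-- ===== CLAIM (what is proved, stated in full; the proofs are below) =====
def Claim_equal_check_two : Prop := ∀ (numbers : List Int), Dom_check_two numbers → Spec_check_two numbers (check_two numbers)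

-- ===== LEMMAS AND PROOFS =====

-- ===== VERDICT (by name: the statement is the Claim_ definition above) =====

def fA (result : Int) (p : Int × Int) : Int :=
  if p.2 ≥ 2 then
    if 2 * (p.1 + 1) > result then 2 * (p.1 + 1) else result
  else result

theorem foldl_ub (l : List (Int × Int)) (acc b : Int)
    (hacc : acc ≤ b) (hl : ∀ p ∈ l, 2 * (p.1 + 1) ≤ b) :
    l.foldl fA acc ≤ b := by
  induction l generalizing acc with
  | nil => exact hacc
  | cons p t ih =>
    simp only [List.foldl_cons]
    refine ih _ ?_ (fun q hq => hl q (List.mem_cons_of_mem _ hq))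
    have := hl p (List.mem_cons_self)
    unfold fA; split_ifs <;> omega

theorem foldl_eq_altGo (l : List (Int × Int))
    (hp : l.Pairwise (fun p q => p.1 < q.1)) (hnn : ∀ p ∈ l, 0 ≤ p.1) :
    l.foldl fA 0 = altGo l.reverse := by
  induction l using List.reverseRecOn with
  | nil => simp [altGo]
  | append_singleton t p ih =>
    have hpair := (List.pairwise_append.mp hp)
    have ht : t.Pairwise (fun p q => p.1 < q.1) := hpair.1
    have hlt : ∀ q ∈ t, q.1 < p.1 := fun q hq => hpair.2.2 q hq p (by simp)
    rw [List.foldl_append, List.reverse_append]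
    simp only [List.reverse_singleton, List.singleton_append, List.foldl_cons, List.foldl_nil]
    have hp0 : 0 ≤ p.1 := hnn p (by simp)
    by_cases hn : p.2 ≥ 2
    · have hub : t.foldl fA 0 ≤ 2 * p.1 :=
        foldl_ub t 0 (2 * p.1) (by omega) (fun q hq => by have := hlt q hq; omega)
      simp only [altGo, fA, if_pos hn]
      rw [if_pos (by omega)]
    · simp only [altGo, fA, if_neg hn]
      exact ih ht (fun q hq => hnn q (by simp [hq]))

theorem check_two_spec : Claim_equal_check_two := by
  intro numbers _
  unfold Spec_check_two check_two check_two_alt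
  refine foldl_eq_altGo _ (PySem.List.pairwise_lt_enumerate numbers 0) ?_
  intro p hp
  obtain ⟨k, hk, rfl⟩ := (PySem.List.mem_enumerate_iff numbers 0 p).mp hp
  simp
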